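-- pv_equiv track=rewrite | github.com/khangdzox/Inference-Engine | dpll.py | find_unit_clause
-- ===== SOURCE A (Python) =====
-- def find_unit_clause(clauses: list[list[str]], model: dict[str, bool]) -> tuple[str | None, bool]:
--     """
--     Find a unit clause in the sentence.
--
--     Args:
--         clauses (`list[list[str]]`): The sentence in CNF.
--         model (`dict[str, bool]`): The model for the sentence.
--
--     Returns:
--         `tuple[str | None, bool]`: A tuple includes: `A unit clause or None if not found`; `The symbol's value`.
--     """
--
--     # eliminate clause that is already true
--     clauses = [clause for clause in clauses if not is_clause_true(clause, model)]
--
--     # return the first single-symbol clause in the sentence if there is any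
--     if single_symbol_clauses := [clause for clause in clauses if len(clause) == 1]:
--         first_symbol = single_symbol_clauses[0][0]
--         return first_symbol.removeprefix('~'), not first_symbol.startswith('~')
--
--     # iterate through all clauses to find a clause that has only one non-false symbol
--     for clause in clauses:
--
--         # find all symbols known to be false in clause
--         false_symbols_in_clause = [
--             symbol.removeprefix('~') for symbol in clause
--             if symbol.removeprefix('~') in model and model[symbol.removeprefix('~')] is symbol.startswith('~')
--         ]
--
--         # find all symbols in clause
--         all_symbols_in_clause = [symbol.removeprefix('~') for symbol in clause]
--
--         # find the difference between all symbols and false symbols, which is the symbols without known value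
--         difference_symbols = list(set(all_symbols_in_clause) - set(false_symbols_in_clause))
--
--         # if there is only one symbol without known value, return it and its value
--         if len(difference_symbols) == 1:
--             return difference_symbols[0].removeprefix('~'), not difference_symbols[0].startswith('~')
--
--     # no unit clause found
--     return None, False
--
-- def is_clause_true(clause: list[str], model: dict[str, bool]) -> bool | None:
--     """
--     Checking whether a CNF clause is true in model.
--
--     Args:
--         clause (`list[str]`): a CNF clause.
--         model (`dict[str, bool]`): The model for the sentence.
--
--     Returns:
--         `bool | None`: Whether the CNF clause is true or None if the truthfulness of clause cannot be determined.
--     """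
--     # return True if any symbol in model is true in clause
--     if any(
--         ('~' if not value else '') + symbol in clause
--         for symbol, value in model.items()
--     ):
--         return True
--
--     # no true symbol in clause
--     # return None if any symbol in clause is not in model
--     if any(
--         symbol.removeprefix('~') not in model
--         for symbol in clause
--     ):
--         return None
--
--     # no non-value symbol in clause
--     # only false symbols remain in clause
--     return False
-- ===== SOURCE B (Python) =====
-- def find_unit_clause(clauses: list[list[str]], model: dict[str, bool]) -> tuple[str | None, bool]:
--     """One combined pass: precompute the set of literal strings made true by the model once,
--     then classify each clause (satisfied / unit / one-unknown) while scanning its literals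
--     a single time, keeping the first candidate of each kind."""
--     true_literals = {(sym if val else '~' + sym) for sym, val in model.items()}
--     single = None
--     one_unknown = None
--     for clause in clauses:
--         satisfied = False
--         unknowns = []
--         for lit in clause:
--             if lit in true_literals:
--                 satisfied = True
--                 break
--             base = lit[1:] if lit.startswith('~') else lit
--             if base not in model and base not in unknowns:
--                 unknowns.append(base)
--         if satisfied:
--             continue
--         if len(clause) == 1:
--             if single is None:
--                 lit = clause[0]
--                 single = (lit[1:] if lit.startswith('~') else lit, not lit.startswith('~'))
--         elif len(unknowns) == 1 and one_unknown is None: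
--             b = unknowns[0]
--             one_unknown = (b[1:] if b.startswith('~') else b, not b.startswith('~'))
--     if single is not None:
--         return single
--     if one_unknown is not None:
--         return one_unknown
--     return None, False
-- ===== Notes on version B (the rewrite author's own statement) =====
-- stated objective: faster
-- what changed: Replaces A's filter-then-two-phase decomposition (is_clause_true rescans the whole model for every clause, plus separate singleton/false-symbol/all-symbol passes and two set constructions per clause) with a true-literal set precomputed once from the model and a single pass over the clauses that scans each clause's literals once, collecting distinct unknown base names and keeping the first singleton and first one-unknown candidates.
import Mathlib
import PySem

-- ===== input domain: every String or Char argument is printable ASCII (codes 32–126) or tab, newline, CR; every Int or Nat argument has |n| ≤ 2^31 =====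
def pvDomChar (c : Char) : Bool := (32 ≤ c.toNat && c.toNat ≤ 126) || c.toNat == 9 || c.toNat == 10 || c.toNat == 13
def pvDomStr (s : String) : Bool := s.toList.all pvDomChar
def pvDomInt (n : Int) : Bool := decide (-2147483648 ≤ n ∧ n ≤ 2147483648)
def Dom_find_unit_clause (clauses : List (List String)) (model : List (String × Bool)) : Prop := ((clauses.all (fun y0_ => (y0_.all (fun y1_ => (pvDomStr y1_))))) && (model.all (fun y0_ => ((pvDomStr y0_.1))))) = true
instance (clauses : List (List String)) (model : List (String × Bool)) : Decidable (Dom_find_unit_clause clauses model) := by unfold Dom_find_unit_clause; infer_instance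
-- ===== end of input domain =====

-- B precomputes the set of literal strings the model makes true, then makes one combined pass over
-- the clauses, scanning each clause's literals once, instead of A's filter-plus-two-phase scans; objective: faster (constant factor).

-- ===== PORT A =====
-- shared literal helpers: s.startswith('~') and s.removeprefix('~') (both Pythons use these expressions verbatim)
def pvStarts (s : String) : Bool := PySem.Str.startswith s "~"
def pvRp (s : String) : String := if pvStarts s then String.ofList (s.toList.drop 1) else s
-- the pair (lit.removeprefix('~'), not lit.startswith('~')) both Pythons return
def pvRes (l : String) : Option String × Bool := (some (pvRp l), !pvStarts l)
-- ('~' if not value else '') + symbol (A builds it per model item, B once per model item for its set)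
def pvMkLit (s : String) (v : Bool) : String := if !v then String.ofList ('~' :: s.toList) else s

-- is_clause_true: bool | None becomes Option Bool (True ↦ some true, None ↦ none, False ↦ some false)
def is_clause_true (clause : List String) (model : List (String × Bool)) : Option Bool :=
  if model.any (fun sv => clause.contains (pvMkLit sv.1 sv.2)) then some true
  else if clause.any (fun s => !((PySem.Dict.mk model).contains (pvRp s))) then none
  else some false

-- A's final for-loop; Python's list(set(all) - set(false)) is consumed only through len == 1 and its
-- sole element, where set iteration order is irrelevant, so the len==1 test + indexing is the singleton match
def fucAux (model : List (String × Bool)) : List (List String) → Option String × Bool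
  | [] => (none, false)
  | clause :: rest =>
    let falseSymbols := (clause.filter (fun s => (PySem.Dict.mk model).get? (pvRp s) == some (pvStarts s))).map pvRp
    let allSymbols := clause.map pvRp
    match PySem.Set.diff (PySem.Set.ofList allSymbols) (PySem.Set.ofList falseSymbols) with
    | [d] => pvRes d
    | _ => fucAux model rest

def find_unit_clause (clauses : List (List String)) (model : List (String × Bool)) : Option String × Bool :=
  let clauses := clauses.filter (fun c => is_clause_true c model != some true)
  match clauses.filter (fun c => c.length == 1) with
  | (fs :: _) :: _ => pvRes fs
  | _ => fucAux model clauses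

-- ===== PORT B =====
-- {(sym if val else '~' + sym) for sym, val in model.items()}
def pvTrueLits (model : List (String × Bool)) : PySem.Set String :=
  PySem.Set.ofList (model.map (fun sv => pvMkLit sv.1 sv.2))

-- inner literal scan: (satisfied?, distinct unknown base names so far); breaks on a satisfied literal
def scanClause (model : List (String × Bool)) (trueLits : PySem.Set String) :
    List String → List String → Bool × List String
  | [], unknowns => (false, unknowns)
  | lit :: rest, unknowns =>
    if trueLits.contains lit then (true, unknowns)
    else scanClause model trueLits rest
      (if (PySem.Dict.mk model).contains (pvRp lit) then unknowns else PySem.Set.add unknowns (pvRp lit))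

-- outer pass keeping the first single-literal and first one-unknown candidates
def bLoop (model : List (String × Bool)) (trueLits : PySem.Set String) :
    List (List String) → Option (Option String × Bool) → Option (Option String × Bool) → Option String × Bool
  | [], single, oneUnknown =>
    match single with
    | some r => r
    | none => match oneUnknown with
      | some r => r
      | none => (none, false)
  | clause :: rest, single, oneUnknown =>
    let su := scanClause model trueLits clause []
    if su.1 then bLoop model trueLits rest single oneUnknown
    else match clause with
      | [lit] => bLoop model trueLits rest (match single with | some r => some r | none => some (pvRes lit)) oneUnknown
      | _ => match su.2, oneUnknown with
        | [u], none => bLoop model trueLits rest single (some (pvRes u))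
        | _, _ => bLoop model trueLits rest single oneUnknown

def find_unit_clause_alt (clauses : List (List String)) (model : List (String × Bool)) : Option String × Bool :=
  bLoop model (pvTrueLits model) clauses none none

-- ===== PRECONDITION & SPEC =====
def Spec_find_unit_clause (clauses : List (List String)) (model : List (String × Bool)) (out : Option String × Bool) : Prop := out = find_unit_clause_alt clauses model
instance (clauses : List (List String)) (model : List (String × Bool)) (out : Option String × Bool) : Decidable (Spec_find_unit_clause clauses model out) := by unfold Spec_find_unit_clause; infer_instance

-- ===== CLAIM (what is proved, stated in full; the proofs are below) =====
def Claim_equal_find_unit_clause : Prop := ∀ (clauses : List (List String)) (model : List (String × Bool)), Dom_find_unit_clause clauses model → Spec_find_unit_clause clauses model (find_unit_clause clauses model)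

-- ===== LEMMAS AND PROOFS =====

-- the satisfaction test B's scan performs on a clause
def pvSat (model : List (String × Bool)) (c : List String) : Bool :=
  c.any (fun l => (pvTrueLits model).contains l)

-- base names of the clause's literals unknown to the model, in order, with duplicates
def pvUnk (model : List (String × Bool)) (c : List String) : List String :=
  (c.filter (fun l => !((PySem.Dict.mk model).contains (pvRp l)))).map pvRp

-- first not-satisfied single-literal clause
def pvFSc (model : List (String × Bool)) (cs : List (List String)) : Option (List String) :=
  cs.findSome? (fun c => if !(pvSat model c) && c.length == 1 then some c else none)

def pvFS (model : List (String × Bool)) (cs : List (List String)) : Option (Option String × Bool) :=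
  match pvFSc model cs with
  | some (l :: _) => some (pvRes l)
  | _ => none

-- first not-satisfied multi-literal clause with exactly one distinct unknown base
def pvFU (model : List (String × Bool)) (cs : List (List String)) : Option (Option String × Bool) :=
  cs.findSome? (fun c =>
    if pvSat model c || c.length == 1 then none
    else match PySem.Set.ofList (pvUnk model c) with
      | [u] => some (pvRes u)
      | _ => none)

-- string facts
theorem pvStarts_iff (s : String) : pvStarts s = true ↔ ['~'] <+: s.toList := by
  simp [pvStarts, PySem.Str.startswith_eq, PySem.Chars.startswith_iff]

theorem pvToList_of_starts (s : String) (h : pvStarts s = true) : s.toList = '~' :: s.toList.drop 1 := by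
  obtain ⟨t, ht⟩ := (pvStarts_iff s).1 h
  rw [← ht]; simp

theorem pvMkLit_of_litTrue (lit : String) (v : Bool) (hv : v = !pvStarts lit) :
    pvMkLit (pvRp lit) v = lit := by
  cases hst : pvStarts lit with
  | false => subst hv; simp [pvMkLit, pvRp, hst]
  | true =>
    subst hv
    simp only [hst, Bool.not_true, pvMkLit, Bool.not_false]
    rw [pvRp, if_pos hst, String.toList_ofList]
    have h2 := pvToList_of_starts lit hst
    calc String.ofList ('~' :: lit.toList.drop 1) = String.ofList lit.toList := by rw [← h2]
      _ = lit := String.ofList_toList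

-- scanClause characterisation
theorem scan_fst (model : List (String × Bool)) (c : List String) : ∀ u,
    (scanClause model (pvTrueLits model) c u).1 = pvSat model c := by
  induction c with
  | nil => intro u; simp [scanClause, pvSat]
  | cons lit rest ih =>
    intro u
    simp only [scanClause, pvSat, List.any_cons]
    cases ht : (pvTrueLits model).contains lit with
    | true => simp
    | false => simp only [Bool.false_or, Bool.false_eq_true, if_false]; exact ih _

theorem scan_snd (model : List (String × Bool)) (c : List String)
    (hk : pvSat model c = false) : ∀ u,
    (scanClause model (pvTrueLits model) c u).2 = PySem.Set.update u (pvUnk model c) := by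
  induction c with
  | nil => intro u; simp [scanClause, pvUnk, PySem.Set.update]
  | cons lit rest ih =>
    intro u
    rw [pvSat, List.any_cons, Bool.or_eq_false_iff] at hk
    simp only [scanClause, hk.1, Bool.false_eq_true, if_false, pvUnk, List.filter_cons]
    cases hc : (PySem.Dict.mk model).contains (pvRp lit) with
    | true =>
      simp only [Bool.not_true, Bool.false_eq_true, if_false, if_true]
      exact ih hk.2 u
    | false =>
      simp only [Bool.not_false, if_true, List.map_cons]
      rw [ih hk.2]
      simp [PySem.Set.update, pvUnk]

-- A's per-clause model scan is B's membership test in the precomputed true-literal set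
theorem any_mkLit_eq (model : List (String × Bool)) (c : List String) :
    model.any (fun sv => c.contains (pvMkLit sv.1 sv.2)) = pvSat model c := by
  rw [Bool.eq_iff_iff, pvSat]
  simp only [List.any_eq_true]
  constructor
  · rintro ⟨⟨s, v⟩, hm, hcont⟩
    refine ⟨pvMkLit s v, by simpa using hcont, ?_⟩
    simp only [pvTrueLits, PySem.Set.contains_eq_listContains, List.contains_iff_mem]
    exact (PySem.Set.mem_ofList _ _).2 (List.mem_map.2 ⟨(s, v), hm, rfl⟩)
  · rintro ⟨lit, hl, ht⟩
    simp only [pvTrueLits, PySem.Set.contains_eq_listContains, List.contains_iff_mem] at ht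
    obtain ⟨⟨s, v⟩, hm, heq⟩ := List.mem_map.1 ((PySem.Set.mem_ofList _ _).1 ht)
    exact ⟨(s, v), hm, by simpa [heq] using hl⟩

-- A's clause filter keeps exactly the clauses B's scan does not find satisfied
theorem kept_eq (model : List (String × Bool)) (c : List String) :
    (is_clause_true c model != some true) = !(pvSat model c) := by
  rw [is_clause_true, any_mkLit_eq model c]
  cases pvSat model c with
  | true => simp
  | false => simp only [Bool.false_eq_true, if_false, Bool.not_false]; split_ifs <;> rfl

-- in a not-satisfied clause, no literal is true under the model
theorem not_litTrue_of_not_sat (model : List (String × Bool)) (c : List String)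
    (hk : pvSat model c = false) (l : String) (hl : l ∈ c) (v : Bool)
    (hg : (PySem.Dict.mk model).get? (pvRp l) = some v) : v = pvStarts l := by
  by_contra hne
  have hv : v = !pvStarts l := by cases v <;> cases hs : pvStarts l <;> simp_all
  have hmem : (pvRp l, v) ∈ model := by
    simpa using PySem.Dict.mem_items_of_get?_eq_some _ hg
  have hlit : (pvTrueLits model).contains l = true := by
    simp only [pvTrueLits, PySem.Set.contains_eq_listContains, List.contains_iff_mem]
    exact (PySem.Set.mem_ofList _ _).2
      (List.mem_map.2 ⟨(pvRp l, v), hmem, pvMkLit_of_litTrue l v hv⟩)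
  have h2 := List.any_eq_false.1 hk l hl
  simp only [hlit] at h2
  simp at h2

theorem ofList_filter {α : Type} [BEq α] [LawfulBEq α] (p : α → Bool) (xs : List α) :
    PySem.Set.ofList (xs.filter p) = (PySem.Set.ofList xs).filter p := by
  have key : ∀ (xs : List α) (acc : List α),
      (xs.filter p).foldl PySem.Set.add (acc.filter p) = (xs.foldl PySem.Set.add acc).filter p := by
    intro xs
    induction xs with
    | nil => intro acc; simp
    | cons x rest ih =>
      intro acc
      by_cases hp : p x = true
      · have hadd : PySem.Set.add (acc.filter p) x = (PySem.Set.add acc x).filter p := by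
          simp only [PySem.Set.add, PySem.Set.contains_eq_listContains]
          have hcf : (acc.filter p).contains x = acc.contains x := by
            rw [Bool.eq_iff_iff]
            simp [List.mem_filter, hp]
          simp only [hcf]
          by_cases hc : acc.contains x = true
          · rw [if_pos hc, if_pos hc]
          · rw [if_neg hc, if_neg hc, List.filter_append]
            simp [hp]
        simp only [List.filter_cons, hp, if_true, List.foldl_cons]
        rw [hadd, ih]
      · simp only [Bool.not_eq_true] at hp
        simp only [List.filter_cons, hp, Bool.false_eq_true, if_false, List.foldl_cons]
        have hadd : acc.filter p = (PySem.Set.add acc x).filter p := by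
          simp only [PySem.Set.add, PySem.Set.contains_eq_listContains]
          split_ifs with hc
          · rfl
          · rw [List.filter_append]; simp [hp]
        rw [hadd, ih]
  have := key xs []
  simpa [PySem.Set.ofList_eq_foldl] using this

-- set(all) - set(false) is set(unknowns) on a not-satisfied clause
theorem diff_eq (model : List (String × Bool)) (c : List String)
    (hk : pvSat model c = false) :
    PySem.Set.diff (PySem.Set.ofList (c.map pvRp))
        (PySem.Set.ofList ((c.filter (fun s => (PySem.Dict.mk model).get? (pvRp s) == some (pvStarts s))).map pvRp))
      = PySem.Set.ofList (pvUnk model c) := by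
  have hunk : pvUnk model c = (c.map pvRp).filter (fun b => !((PySem.Dict.mk model).contains b)) := by
    rw [pvUnk]
    exact (List.filter_map (l := c) (f := pvRp) (p := fun b => !((PySem.Dict.mk model).contains b))).symm
  rw [hunk, ofList_filter, PySem.Set.diff]
  apply List.filter_congr
  intro b hb
  have hbc : b ∈ c.map pvRp := (PySem.Set.mem_ofList _ _).1 hb
  obtain ⟨l0, hl0, rfl⟩ := List.mem_map.1 hbc
  cases hg : (PySem.Dict.mk model).get? (pvRp l0) with
  | none =>
    have hcf : (PySem.Dict.mk model).contains (pvRp l0) = false := by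
      rw [PySem.Dict.contains_eq_isSome_get?, hg]; rfl
    rw [hcf]
    simp only [Bool.not_false]
    rw [Bool.not_eq_true']
    rw [Bool.eq_false_iff]
    intro hcont
    simp only [PySem.Set.contains, List.contains_iff_mem] at hcont
    have hmem := (PySem.Set.mem_ofList _ _).1 hcont
    obtain ⟨l1, hl1, heq⟩ := List.mem_map.1 hmem
    have hq := (List.mem_filter.1 hl1).2
    rw [heq] at hq
    rw [hg] at hq
    simp at hq
  | some v =>
    have hcf : (PySem.Dict.mk model).contains (pvRp l0) = true := by
      rw [PySem.Dict.contains_eq_isSome_get?, hg]; rfl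
    rw [hcf]
    have hv : v = pvStarts l0 := not_litTrue_of_not_sat model c hk l0 hl0 v hg
    have hq : ((PySem.Dict.mk model).get? (pvRp l0) == some (pvStarts l0)) = true := by
      rw [hg, hv]; simp
    have hmm : pvRp l0 ∈ (c.filter (fun s => (PySem.Dict.mk model).get? (pvRp s) == some (pvStarts s))).map pvRp :=
      List.mem_map.2 ⟨l0, List.mem_filter.2 ⟨hl0, hq⟩, rfl⟩
    have hcont : (PySem.Set.ofList ((c.filter (fun s => (PySem.Dict.mk model).get? (pvRp s) == some (pvStarts s))).map pvRp)).contains (pvRp l0) = true := by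
      simp only [PySem.Set.contains, List.contains_iff_mem]
      exact (PySem.Set.mem_ofList _ _).2 hmm
    rw [hcont]

-- B's loop characterisation
theorem bLoop_char (model : List (String × Bool)) : ∀ (cs : List (List String))
    (single oneUnknown : Option (Option String × Bool)),
    bLoop model (pvTrueLits model) cs single oneUnknown =
      match single with
      | some r => r
      | none => match pvFS model cs with
        | some r => r
        | none => match oneUnknown with
          | some r => r
          | none => match pvFU model cs with
            | some r => r
            | none => (none, false) := by
  intro cs
  induction cs with
  | nil =>
    intro single oneUnknown
    cases single <;> cases oneUnknown <;> simp [bLoop, pvFS, pvFSc, pvFU]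
  | cons clause rest ih =>
    intro single oneUnknown
    simp only [bLoop, scan_fst]
    cases hsat : pvSat model clause with
    | true =>
      simp only [if_true]
      have h1 : pvFSc model (clause :: rest) = pvFSc model rest := by
        rw [pvFSc, pvFSc, List.findSome?_cons, hsat]; simp
      have hpfs : pvFS model (clause :: rest) = pvFS model rest := by
        unfold pvFS; rw [h1]
      have hpfu : pvFU model (clause :: rest) = pvFU model rest := by
        rw [pvFU, pvFU, List.findSome?_cons, hsat]; simp
      rw [ih, hpfs, hpfu]
    | false =>
      have hpfsc : pvFSc model (clause :: rest) =
          (if clause.length == 1 then some clause else none).orElse (fun _ => pvFSc model rest) := by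
        rw [pvFSc, pvFSc, List.findSome?_cons, hsat]
        by_cases hl : (clause.length == 1) = true
        · rw [hl]; simp
        · rw [Bool.not_eq_true] at hl; rw [hl]; simp
      have hsnd : (scanClause model (pvTrueLits model) clause []).2 = PySem.Set.ofList (pvUnk model clause) :=
        scan_snd model clause hsat []
      simp only [Bool.false_eq_true, if_false]
      cases clause with
      | nil =>
        have hpfs : pvFS model ([] :: rest) = pvFS model rest := by
          unfold pvFS; rw [hpfsc]; simp
        have hpfu : pvFU model ([] :: rest) = pvFU model rest := by
          simp only [pvFU, List.findSome?_cons]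
          have h2 : PySem.Set.ofList (pvUnk model ([] : List String)) = [] := rfl
          simp [hsat, h2]
        have h2 : (scanClause model (pvTrueLits model) [] []).2 = [] := rfl
        cases single <;> cases oneUnknown <;> simp [ih, hpfs, hpfu, h2]
      | cons lit tail =>
        cases tail with
        | nil =>
          have hpfs : pvFS model ([lit] :: rest) = some (pvRes lit) := by
            unfold pvFS; rw [hpfsc]; simp
          cases single <;> cases oneUnknown <;> simp [ih, hpfs]
        | cons lit2 tail2 =>
          have hlen : ((lit :: lit2 :: tail2).length == 1) = false := by simp
          have hpfs : pvFS model ((lit :: lit2 :: tail2) :: rest) = pvFS model rest := by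
            unfold pvFS; rw [hpfsc]; simp
          have hpfu : pvFU model ((lit :: lit2 :: tail2) :: rest) =
              (match PySem.Set.ofList (pvUnk model (lit :: lit2 :: tail2)) with
                | [u] => some (pvRes u)
                | _ => none).orElse (fun _ => pvFU model rest) := by
            rw [pvFU, List.findSome?_cons, hsat, hlen]
            cases PySem.Set.ofList (pvUnk model (lit :: lit2 :: tail2)) with
            | nil => rw [pvFU]; simp
            | cons u t => cases t <;> rw [pvFU] <;> simp
          cases hsh : PySem.Set.ofList (pvUnk model (lit :: lit2 :: tail2)) with
          | nil =>
            cases single <;> cases oneUnknown <;> simp [ih, hpfs, hpfu, hsnd, hsh]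
          | cons u t =>
            cases t with
            | nil =>
              cases single <;> cases oneUnknown <;> simp [ih, hpfs, hpfu, hsnd, hsh]
            | cons w t2 =>
              cases single <;> cases oneUnknown <;> simp [ih, hpfs, hpfu, hsnd, hsh]

-- head of A's filtered singleton list is the first not-satisfied single-literal clause
theorem fsc_head (model : List (String × Bool)) (cs : List (List String)) :
    pvFSc model cs = ((cs.filter (fun c => !(pvSat model c))).filter (fun c => c.length == 1)).head? := by
  induction cs with
  | nil => simp [pvFSc]
  | cons c rest ih =>
    simp only [pvFSc, List.findSome?_cons, List.filter_cons]
    cases hsat : pvSat model c with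
    | true => simpa [pvFSc] using ih
    | false =>
      by_cases hl : (c.length == 1) = true
      · simp [hl]
      · simp only [Bool.not_eq_true] at hl
        simp only [Bool.not_false, if_true, List.filter_cons, hl]
        simpa [pvFSc, hl] using ih

-- A's final loop over the kept clauses, assuming no kept single-literal clause
theorem fuc_char (model : List (String × Bool)) : ∀ (cs : List (List String)),
    pvFSc model cs = none →
    fucAux model (cs.filter (fun c => !(pvSat model c))) =
      match pvFU model cs with
      | some r => r
      | none => (none, false) := by
  intro cs
  induction cs with
  | nil => intro _; simp [fucAux, pvFU]
  | cons c rest ih =>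
    intro hs
    simp only [pvFSc, List.findSome?_cons] at hs
    have hrest : pvFSc model rest = none := by
      rcases h : (if !(pvSat model c) && c.length == 1 then some c else none) with _ | v
      · rw [h] at hs; exact hs
      · rw [h] at hs; simp at hs
    have hc : (!(pvSat model c) && c.length == 1) = false := by
      by_contra hne
      rw [Bool.not_eq_false] at hne
      rw [if_pos hne] at hs
      simp at hs
    cases hsat : pvSat model c with
    | true =>
      simp only [List.filter_cons, hsat, Bool.not_true, Bool.false_eq_true, if_false]
      rw [ih hrest]
      have hpfu : pvFU model (c :: rest) = pvFU model rest := by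
        rw [pvFU, pvFU, List.findSome?_cons, hsat]; simp
      rw [hpfu]
    | false =>
      have hl : (c.length == 1) = false := by
        rw [hsat] at hc; simpa using hc
      simp only [List.filter_cons, hsat, Bool.not_false, if_true]
      rw [fucAux]
      rw [diff_eq model c hsat]
      have hfu : pvFU model (c :: rest) =
          (match PySem.Set.ofList (pvUnk model c) with
            | [u] => some (pvRes u)
            | _ => none).orElse (fun _ => pvFU model rest) := by
        rw [pvFU, List.findSome?_cons, hsat, hl]
        cases PySem.Set.ofList (pvUnk model c) with
        | nil => rw [pvFU]; simp
        | cons u t => cases t <;> rw [pvFU] <;> simp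
      rw [hfu]
      cases hsh : PySem.Set.ofList (pvUnk model c) with
      | nil => simpa using ih hrest
      | cons u t =>
        cases t with
        | nil => simp
        | cons w t2 => simpa using ih hrest

-- A's result characterisation
theorem A_char (model : List (String × Bool)) (cs : List (List String)) :
    find_unit_clause cs model =
      match pvFS model cs with
      | some r => r
      | none => match pvFU model cs with
        | some r => r
        | none => (none, false) := by
  rw [find_unit_clause]
  have hfc : cs.filter (fun c => is_clause_true c model != some true)
      = cs.filter (fun c => !(pvSat model c)) :=
    List.filter_congr (fun c _ => kept_eq model c)
  simp only [hfc]
  cases hL : (cs.filter (fun c => !(pvSat model c))).filter (fun c => c.length == 1) with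
  | nil =>
    have hfsc : pvFSc model cs = none := by rw [fsc_head, hL]; rfl
    have hfs : pvFS model cs = none := by rw [pvFS, hfsc]
    rw [hfs]
    exact fuc_char model cs hfsc
  | cons c0 t =>
    have hc0 : c0 ∈ (cs.filter (fun c => !(pvSat model c))).filter (fun c => c.length == 1) := by
      rw [hL]; exact List.mem_cons_self
    have hlen : c0.length = 1 := by
      have := (List.mem_filter.1 hc0).2; simpa using this
    have hfsc : pvFSc model cs = some c0 := by rw [fsc_head, hL]; rfl
    cases c0 with
    | nil => simp at hlen
    | cons l tl =>
      cases tl with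
      | nil =>
        have hfs : pvFS model cs = some (pvRes l) := by rw [pvFS, hfsc]
        rw [hfs]
      | cons b tb => simp at hlen

-- ===== VERDICT (by name: the statement is the Claim_ definition above) =====
theorem find_unit_clause_spec : Claim_equal_find_unit_clause := by
  intro clauses model _
  unfold Spec_find_unit_clause find_unit_clause_alt
  rw [A_char model clauses, bLoop_char model clauses none none]
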